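-- pv_equiv track=rewrite | github.com/Th0rgal/morpho-verity | scripts/check_issue_blocker_clusters.py | derive_cluster_blockers
-- ===== SOURCE A (Python) =====
-- from typing import Any
--
-- class IssueClusterError(RuntimeError):
--   pass
--
-- def derive_cluster_blockers(
--   operations: list[str],
--   obligations_by_operation: dict[str, dict[str, Any]],
-- ) -> tuple[list[str], dict[str, int]]:
--   counts: dict[str, int] = {}
--   for operation in operations:
--     obligation = obligations_by_operation[operation]
--     blockers = obligation.get("macroSurfaceBlockers", [])
--     if not isinstance(blockers, list) or not all(isinstance(b, str) for b in blockers):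
--       raise IssueClusterError(
--         f"operation '{operation}' has invalid macroSurfaceBlockers; expected string list"
--       )
--     for blocker in blockers:
--       counts[blocker] = counts.get(blocker, 0) + 1
--   return sorted(counts), dict(sorted(counts.items()))
-- ===== SOURCE B (Python) =====
-- from itertools import groupby
-- from typing import Any
--
-- class IssueClusterError(RuntimeError):
--   pass
--
-- def derive_cluster_blockers(
--   operations: list[str],
--   obligations_by_operation: dict[str, dict[str, Any]],
-- ) -> tuple[list[str], dict[str, int]]:
--   all_blockers: list[str] = []
--   for operation in operations:
--     obligation = obligations_by_operation[operation]
--     blockers = obligation.get("macroSurfaceBlockers", [])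
--     if not isinstance(blockers, list) or not all(isinstance(b, str) for b in blockers):
--       raise IssueClusterError(
--         f"operation '{operation}' has invalid macroSurfaceBlockers; expected string list"
--       )
--     all_blockers.extend(blockers)
--   all_blockers.sort()
--   counts = {key: len(list(group)) for key, group in groupby(all_blockers)}
--   return list(counts), counts
-- ===== Notes on version B (the rewrite author's own statement) =====
-- stated objective: alternative
-- what changed: Replaces the incremental dict-counter with validation-only collection into one flat list, a single sort, and an itertools.groupby run-length pass whose sorted output needs no final re-sorting.
import Mathlib
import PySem

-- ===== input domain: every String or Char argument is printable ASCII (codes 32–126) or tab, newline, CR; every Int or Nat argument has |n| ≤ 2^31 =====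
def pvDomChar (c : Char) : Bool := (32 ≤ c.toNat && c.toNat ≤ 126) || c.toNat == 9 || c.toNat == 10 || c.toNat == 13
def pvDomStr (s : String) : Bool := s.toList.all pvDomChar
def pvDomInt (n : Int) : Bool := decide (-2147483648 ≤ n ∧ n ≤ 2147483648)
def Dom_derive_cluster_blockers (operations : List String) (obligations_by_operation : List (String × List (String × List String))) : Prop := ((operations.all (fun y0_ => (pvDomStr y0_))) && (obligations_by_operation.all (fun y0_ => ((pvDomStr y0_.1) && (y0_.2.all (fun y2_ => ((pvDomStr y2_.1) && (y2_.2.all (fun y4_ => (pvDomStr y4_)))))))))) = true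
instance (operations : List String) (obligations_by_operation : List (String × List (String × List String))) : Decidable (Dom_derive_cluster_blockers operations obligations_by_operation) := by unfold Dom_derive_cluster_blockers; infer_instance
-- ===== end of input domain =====

-- B builds one flat blocker list, sorts it once and counts runs (groupby) instead of A's
-- incremental dict counter followed by two sorts: a different decomposition, similar cost.

-- ===== PORT A =====
-- A's isinstance checks (list of str) are vacuous under the Lean typing, so they cannot raise
-- here; the dict lookup obligations_by_operation[operation] raises KeyError on a missing key:
-- that case is excluded by Pre_ below (the port skips such an operation there).
def derive_cluster_blockers (operations : List String) (obligations_by_operation : List (String × List (String × List String))) : List String × (List (String × Int)) :=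
  let d := PySem.Dict.ofList obligations_by_operation
  let counts := operations.foldl (fun counts operation =>
    match d.get? operation with
    | none => counts  -- Python: KeyError (outside Pre_)
    | some obligation =>
      let blockers := (PySem.Dict.ofList obligation).getD "macroSurfaceBlockers" []
      blockers.foldl (fun c b => c.insert b (c.getD b 0 + 1)) counts) PySem.Dict.empty
  (PySem.List.sorted counts.keys (fun k => k) false,
   PySem.List.sorted2 counts.items (fun p => p.1) (fun p => p.2) false)

-- ===== PORT B =====
-- one pass of itertools.groupby over a sorted list: run head and run length
def pvGroupRuns : List String → List (String × Int)
  | [] => []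
  | x :: xs =>
    (x, ((xs.takeWhile (fun y => y == x)).length : Int) + 1) ::
      pvGroupRuns (xs.dropWhile (fun y => y == x))
  termination_by s => s.length
  decreasing_by simp; exact List.length_dropWhile_le _ _

def derive_cluster_blockers_alt (operations : List String) (obligations_by_operation : List (String × List (String × List String))) : List String × (List (String × Int)) :=
  let d := PySem.Dict.ofList obligations_by_operation
  let all_blockers := operations.foldl (fun acc operation =>
    match d.get? operation with
    | none => acc  -- Python: KeyError (outside Pre_)
    | some obligation => acc ++ (PySem.Dict.ofList obligation).getD "macroSurfaceBlockers" []) []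
  let sorted_blockers := PySem.List.sorted all_blockers (fun b => b) false
  let counts := pvGroupRuns sorted_blockers
  (counts.map (fun p => p.1), counts)

-- ===== PRECONDITION & SPEC =====
-- Pre_ excludes exactly the inputs where Python raises KeyError: an operation missing from the dict.
def Pre_derive_cluster_blockers (operations : List String) (obligations_by_operation : List (String × List (String × List String))) : Prop :=
  ∀ op ∈ operations, op ∈ obligations_by_operation.map (fun p => p.1)
instance (operations : List String) (obligations_by_operation : List (String × List (String × List String))) : Decidable (Pre_derive_cluster_blockers operations obligations_by_operation) := by unfold Pre_derive_cluster_blockers; infer_instance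

def pvWitness_derive_cluster_blockers : List String × (List (String × List (String × List String))) :=
  (["op1", "op2", "op1"],
   [("op1", [("macroSurfaceBlockers", ["b2", "b1", "b2"])]),
    ("op2", [("other", []), ("macroSurfaceBlockers", ["b1"])])])

def Spec_derive_cluster_blockers (operations : List String) (obligations_by_operation : List (String × List (String × List String))) (out : List String × (List (String × Int))) : Prop := out = derive_cluster_blockers_alt operations obligations_by_operation
instance (operations : List String) (obligations_by_operation : List (String × List (String × List String))) (out : List String × (List (String × Int))) : Decidable (Spec_derive_cluster_blockers operations obligations_by_operation out) := by unfold Spec_derive_cluster_blockers; infer_instance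

-- ===== CLAIM (what is proved, stated in full; the proofs are below) =====
def Claim_equal_derive_cluster_blockers : Prop := ∀ (operations : List String) (obligations_by_operation : List (String × List (String × List String))), Dom_derive_cluster_blockers operations obligations_by_operation → Pre_derive_cluster_blockers operations obligations_by_operation → Spec_derive_cluster_blockers operations obligations_by_operation (derive_cluster_blockers operations obligations_by_operation)

-- ===== LEMMAS AND PROOFS =====

-- the per-operation blocker list both ports extract (with the KeyError case as [])
def pvBlk (d : PySem.Dict String (List (String × List String))) (op : String) : List String :=
  match d.get? op with
  | none => []
  | some obligation => (PySem.Dict.ofList obligation).getD "macroSurfaceBlockers" []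

theorem pvFoldA (d : PySem.Dict String (List (String × List String)))
    (ops : List String) (c : PySem.Dict String Int) :
    ops.foldl (fun counts operation =>
      match d.get? operation with
      | none => counts
      | some obligation =>
        ((PySem.Dict.ofList obligation).getD "macroSurfaceBlockers" []).foldl
          (fun c b => c.insert b (c.getD b 0 + 1)) counts) c
    = (ops.flatMap (pvBlk d)).foldl (fun c b => c.insert b (c.getD b 0 + 1)) c := by
  induction ops generalizing c with
  | nil => rfl
  | cons op rest ih =>
    simp only [List.foldl_cons, List.flatMap_cons, List.foldl_append]
    cases h : d.get? op with
    | none => simp only [h, pvBlk]; rw [ih]; rfl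
    | some o => simp only [h, pvBlk]; rw [ih]

theorem pvFoldB (d : PySem.Dict String (List (String × List String)))
    (ops : List String) (acc : List String) :
    ops.foldl (fun acc operation =>
      match d.get? operation with
      | none => acc
      | some obligation => acc ++ (PySem.Dict.ofList obligation).getD "macroSurfaceBlockers" []) acc
    = acc ++ ops.flatMap (pvBlk d) := by
  induction ops generalizing acc with
  | nil => simp
  | cons op rest ih =>
    simp only [List.foldl_cons, List.flatMap_cons]
    cases h : d.get? op with
    | none => simp only [h, pvBlk]; rw [ih]; simp
    | some o => simp only [h, pvBlk]; rw [ih]; simp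

theorem pvGroupRuns_spec : ∀ (s : List String), s.Pairwise (· ≤ ·) →
    ((pvGroupRuns s).map Prod.fst).Pairwise (· < ·) ∧
    (∀ k, k ∈ (pvGroupRuns s).map Prod.fst ↔ k ∈ s) ∧
    pvGroupRuns s = ((pvGroupRuns s).map Prod.fst).map (fun k => (k, (s.count k : Int))) := by
  intro s
  induction s using pvGroupRuns.induct with
  | case1 => intro _; refine ⟨by simp [pvGroupRuns], by simp [pvGroupRuns], by simp [pvGroupRuns]⟩
  | case2 x xs ih =>
    intro h
    rw [List.pairwise_cons] at h
    obtain ⟨hx, hxs⟩ := h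
    have hsplit : xs.takeWhile (fun y => y == x) ++ xs.dropWhile (fun y => y == x) = xs :=
      List.takeWhile_append_dropWhile
    have hrun : ∀ y ∈ xs.takeWhile (fun y => y == x), y = x := by
      intro y hy
      have := List.mem_takeWhile_imp hy
      exact eq_of_beq this
    have hrest_pw : (xs.dropWhile (fun y => y == x)).Pairwise (· ≤ ·) :=
      hxs.sublist (List.dropWhile_sublist _)
    have hrest_sub : ∀ y ∈ xs.dropWhile (fun y => y == x), y ∈ xs :=
      fun y hy => (List.dropWhile_sublist _).subset hy
    have hxr : ∀ y ∈ xs.dropWhile (fun y => y == x), x < y := by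
      cases hr : xs.dropWhile (fun y => y == x) with
      | nil => intro y hy; simp at hy
      | cons r rs =>
        have hrx : ¬ (r == x) = true := by
          have := List.head_dropWhile_not (fun y => y == x) (l := xs) (by simp [hr])
          simpa [hr] using this
        have hrmem : r ∈ xs := hrest_sub r (by simp [hr])
        have hxltr : x < r := lt_of_le_of_ne (hx r hrmem) (fun e => hrx (by simp [e.symm]))
        intro y hy
        rcases List.mem_cons.mp hy with rfl | hyr
        · exact hxltr
        · have : r ≤ y := by
            have := hrest_pw
            rw [hr, List.pairwise_cons] at this
            exact this.1 y hyr
          exact lt_of_lt_of_le hxltr this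
    have hxnotin : x ∉ xs.dropWhile (fun y => y == x) := by
      intro hmem; exact lt_irrefl x (hxr x hmem)
    obtain ⟨P1, P2, P3⟩ := ih hrest_pw
    have hstep : pvGroupRuns (x :: xs) =
        (x, ((xs.takeWhile (fun y => y == x)).length : Int) + 1) ::
          pvGroupRuns (xs.dropWhile (fun y => y == x)) := by
      rw [pvGroupRuns]
    refine ⟨?_, ?_, ?_⟩
    · rw [hstep]
      simp only [List.map_cons, List.pairwise_cons]
      refine ⟨?_, P1⟩
      intro k hk
      rcases List.mem_map.mp hk with ⟨p, hp, rfl⟩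
      exact hxr p.1 ((P2 p.1).mp (List.mem_map.mpr ⟨p, hp, rfl⟩))
    · intro k
      rw [hstep]
      simp only [List.map_cons, List.mem_cons]
      constructor
      · rintro (rfl | hk)
        · left; rfl
        · right; exact hrest_sub k ((P2 k).mp hk)
      · rintro (rfl | hk)
        · left; rfl
        · rw [← hsplit] at hk
          rcases List.mem_append.mp hk with hk | hk
          · left; exact hrun k hk
          · right; exact (P2 k).mpr hk
    · rw [hstep]
      simp only [List.map_cons]
      congr 1
      · -- head run: count of x in x :: xs is run length + 1
        have hcrest : (xs.dropWhile (fun y => y == x)).count x = 0 :=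
          List.count_eq_zero.mpr hxnotin
        have hcrun : (xs.takeWhile (fun y => y == x)).count x
            = (xs.takeWhile (fun y => y == x)).length := by
          apply List.count_eq_length.mpr
          intro b hb; exact (hrun b hb).symm
        have hc : (x :: xs).count x = (xs.takeWhile (fun y => y == x)).length + 1 := by
          rw [List.count_cons_self]
          conv_lhs => rw [← hsplit]
          rw [List.count_append, hcrun, hcrest]
        simp [hc]
      · -- tail: counts in the remainder agree with counts in x :: xs
        conv_lhs => rw [P3]
        apply List.map_congr_left
        intro k hk
        have hkrest : k ∈ xs.dropWhile (fun y => y == x) := (P2 k).mp hk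
        have hklt : x < k := hxr k hkrest
        have hkx : k ≠ x := ne_of_gt hklt
        have hcrun : (xs.takeWhile (fun y => y == x)).count k = 0 := by
          apply List.count_eq_zero.mpr
          intro hmem; exact hkx (hrun k hmem)
        have h1 : (x :: xs).count k = xs.count k := by
          simp [List.count_cons]
          exact fun e => hkx e.symm
        have : (x :: xs).count k = (xs.dropWhile (fun y => y == x)).count k := by
          rw [h1]
          conv_lhs => rw [← hsplit]
          rw [List.count_append, hcrun]
          omega
        rw [this]

theorem pvInsertBy_congr {α : Type} (b1 b2 : α → α → Bool) (x : α) :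
    ∀ ys : List α, (∀ y ∈ ys, b1 x y = b2 x y) →
      PySem.List.insertBy b1 x ys = PySem.List.insertBy b2 x ys := by
  intro ys
  induction ys with
  | nil => intro _; rfl
  | cons y ys ih =>
    intro h
    simp only [PySem.List.insertBy]
    rw [h y (by simp)]
    cases b2 x y with
    | true => simp
    | false => simp; exact ih (fun z hz => h z (by simp [hz]))

theorem pvFoldlInsertBy_congr {α : Type} (b1 b2 : α → α → Bool) (p : α → Prop)
    (hb : ∀ a b, p a → p b → b1 a b = b2 a b) :
    ∀ (xs acc : List α), (∀ x ∈ xs, p x) → (∀ y ∈ acc, p y) →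
      xs.foldl (fun acc x => PySem.List.insertBy b1 x acc) acc
        = xs.foldl (fun acc x => PySem.List.insertBy b2 x acc) acc := by
  intro xs
  induction xs with
  | nil => intro _ _ _; rfl
  | cons x xs ih =>
    intro acc hxs hacc
    simp only [List.foldl_cons]
    have hx : p x := hxs x (by simp)
    rw [pvInsertBy_congr b1 b2 x acc (fun y hy => hb x y hx (hacc y hy))]
    apply ih
    · exact fun z hz => hxs z (by simp [hz])
    · intro y hy
      rcases (PySem.List.mem_insertBy _ _ _ _).mp hy with rfl | hy'
      · exact hx
      · exact hacc y hy'

-- Python's sorted(pairs) compares tuples; with pairwise-distinct first components the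
-- second component is never consulted, so it equals sorting by the first component.
theorem pvSorted2_eq_sorted_fst (xs : List (String × Int))
    (hinj : ∀ a ∈ xs, ∀ b ∈ xs, a.1 = b.1 → a = b) :
    PySem.List.sorted2 xs (fun p => p.1) (fun p => p.2) false
      = PySem.List.sorted xs (fun p => p.1) false := by
  simp only [PySem.List.sorted2, PySem.List.sorted]
  apply pvFoldlInsertBy_congr _ _ (· ∈ xs) ?_ xs [] (fun x hx => hx) (by simp)
  intro a b ha hb
  rcases lt_trichotomy a.1 b.1 with h | h | h
  · simp [h, asymm h]
  · have : a = b := hinj a ha b hb h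
    subst this
    simp
  · simp [h, asymm h]

-- ===== VERDICT (by name: the statement is the Claim_ definition above) =====
theorem derive_cluster_blockers_spec : Claim_equal_derive_cluster_blockers := by
  intro ops obl _ _
  unfold Spec_derive_cluster_blockers
  show derive_cluster_blockers ops obl = derive_cluster_blockers_alt ops obl
  simp only [derive_cluster_blockers, derive_cluster_blockers_alt]
  rw [pvFoldA, pvFoldB]
  simp only [List.nil_append]
  set d := PySem.Dict.ofList obl with hd
  set L := ops.flatMap (pvBlk d) with hL
  have hcounter : L.foldl (fun c b => c.insert b (c.getD b 0 + 1)) PySem.Dict.empty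
      = PySem.Dict.counter L := PySem.Dict.foldl_insert_getD_add_one_eq_counter L
  rw [hcounter]
  -- the sorted flat list and its run decomposition
  set s := PySem.List.sorted L (fun b => b) false with hs
  have hs_pw : s.Pairwise (· ≤ ·) := by
    have := PySem.List.sorted_pairwise L (fun b => b)
    simpa using this
  obtain ⟨P1, P2, P3⟩ := pvGroupRuns_spec s hs_pw
  have hs_perm : s.Perm L := PySem.List.sorted_perm L (fun b => b) false
  -- the sorted distinct keys
  set K := PySem.List.sorted (PySem.Set.ofList L) (fun k => k) false with hK
  have hK_lt : K.Pairwise (· < ·) := PySem.List.sorted_ofList_pairwise_lt L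
  have hK_perm : K.Perm (PySem.Set.ofList L) := PySem.List.sorted_perm _ _ false
  have hKeq : K = (pvGroupRuns s).map Prod.fst := by
    have h1 : K.Nodup := (hK_lt.imp (fun h => ne_of_lt h))
    have h2 : ((pvGroupRuns s).map Prod.fst).Nodup := (P1.imp (fun h => ne_of_lt h))
    have hmem : ∀ k, k ∈ K ↔ k ∈ (pvGroupRuns s).map Prod.fst := by
      intro k
      rw [P2 k]
      constructor
      · intro hk
        have : k ∈ PySem.Set.ofList L := ((PySem.List.mem_sorted _ _ _ _).mp hk)
        have : k ∈ L := (PySem.Set.mem_ofList _ _).mp this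
        exact hs_perm.mem_iff.mpr this
      · intro hk
        have : k ∈ L := hs_perm.mem_iff.mp hk
        exact (PySem.List.mem_sorted _ _ _ _).mpr ((PySem.Set.mem_ofList _ _).mpr this)
    have hperm : K.Perm ((pvGroupRuns s).map Prod.fst) :=
      (List.perm_ext_iff_of_nodup h1 h2).mpr hmem
    exact hperm.eq_of_pairwise (fun a b _ _ h1 h2 => le_antisymm h1 h2)
      (hK_lt.imp (fun h => le_of_lt h)) (P1.imp (fun h => le_of_lt h))
  -- both components
  refine Prod.ext ?_ ?_
  · -- the sorted key lists agree
    show PySem.List.sorted (PySem.Dict.counter L).keys (fun k => k) false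
        = (pvGroupRuns s).map (fun p => p.1)
    rw [PySem.Dict.keys_counter]
    exact hKeq
  · -- the sorted items agree with the run counts
    show PySem.List.sorted2 (PySem.Dict.counter L).items (fun p => p.1) (fun p => p.2) false
        = pvGroupRuns s
    have hitems : (PySem.Dict.counter L).items
        = (PySem.Set.ofList L).map (fun k => (k, (L.count k : Int))) :=
      PySem.Dict.items_counter L
    have hinj : ∀ a ∈ (PySem.Dict.counter L).items, ∀ b ∈ (PySem.Dict.counter L).items,
        a.1 = b.1 → a = b := by
      intro a ha b hb hab
      rw [hitems] at ha hb
      rcases List.mem_map.mp ha with ⟨k1, _, rfl⟩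
      rcases List.mem_map.mp hb with ⟨k2, _, rfl⟩
      simp only at hab
      subst hab
      rfl
    rw [pvSorted2_eq_sorted_fst _ hinj]
    have htarget : PySem.List.sorted (PySem.Dict.counter L).items (fun p => p.1) false
        = K.map (fun k => (k, (L.count k : Int))) := by
      apply PySem.List.sorted_eq_of_perm_of_pairwise_lt
      · rw [hitems]
        exact hK_perm.map _
      · rw [List.pairwise_map]
        exact hK_lt
    rw [htarget, P3, ← hKeq]
    apply List.map_congr_left
    intro k _
    rw [hs_perm.count_eq]
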